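-- pv_equiv track=rewrite | github.com/dimk00z/summer_yandex_algorithmic_course | Homework_3/F_Alien_genome/F_Alien_genome.py | get_coincidence
-- ===== SOURCE A (Python) =====
-- def get_coincidence(DNA_A, DNA_B):
--     set_b = set()
--     for position in range(len(DNA_B)-1):
--         set_b.add(DNA_B[position:position+2])
--     count = 0
--     for position in range(len(DNA_A)-1):
--         current_genome = DNA_A[position:position+2]
--         if current_genome in set_b:
--             count += 1
--     return str(count)
-- ===== SOURCE B (Python) =====
-- def get_coincidence(DNA_A, DNA_B):
--     freq = {}
--     for x, y in zip(DNA_A, DNA_A[1:]):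
--         g = x + y
--         freq[g] = freq.get(g, 0) + 1
--     return str(sum(c for g, c in freq.items() if g in DNA_B))
-- ===== Notes on version B (the rewrite author's own statement) =====
-- stated objective: alternative
-- what changed: Inverts the data flow: instead of indexing B's 2-grams into a set and scanning A per position, B aggregates A's 2-grams (built from consecutive character pairs, no slicing) into a frequency dict in one pass and then sums the multiplicities of the distinct 2-grams that occur as substrings of B.
import Mathlib
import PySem

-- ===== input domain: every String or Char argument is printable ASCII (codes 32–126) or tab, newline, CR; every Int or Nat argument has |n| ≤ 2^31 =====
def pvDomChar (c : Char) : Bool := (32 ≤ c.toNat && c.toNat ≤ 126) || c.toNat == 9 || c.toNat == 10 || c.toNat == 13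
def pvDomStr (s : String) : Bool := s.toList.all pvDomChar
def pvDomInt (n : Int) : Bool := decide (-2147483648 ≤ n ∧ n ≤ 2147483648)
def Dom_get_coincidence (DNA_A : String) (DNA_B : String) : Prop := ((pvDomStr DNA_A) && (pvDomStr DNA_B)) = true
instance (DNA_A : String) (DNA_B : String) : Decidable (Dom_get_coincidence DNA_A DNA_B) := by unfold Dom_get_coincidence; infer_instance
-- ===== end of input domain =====

-- B inverts A's data flow: instead of indexing B's 2-grams into a set and scanning A per
-- position, B aggregates A's consecutive character pairs into a frequency dict and sums the
-- multiplicities of the distinct 2-grams occurring as substrings of B (alternative, not faster).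

-- ===== PORT A =====
def get_coincidence (DNA_A : String) (DNA_B : String) : String :=
  let set_b : PySem.Set String :=
    (PySem.List.pyRange 0 (PySem.Str.len DNA_B - 1) 1).foldl
      (fun s position => s.add (PySem.Str.slice DNA_B (some position) (some (position + 2))))
      PySem.Set.empty
  let count : Int :=
    (PySem.List.pyRange 0 (PySem.Str.len DNA_A - 1) 1).foldl
      (fun count position =>
        let current_genome := PySem.Str.slice DNA_A (some position) (some (position + 2))
        if set_b.contains current_genome then count + 1 else count)
      0
  PySem.Int.toStr count

-- ===== PORT B =====
def get_coincidence_alt (DNA_A : String) (DNA_B : String) : String :=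
  -- for x, y in zip(DNA_A, DNA_A[1:]): g = x + y; freq[g] = freq.get(g, 0) + 1
  let freq : PySem.Dict String Int :=
    (DNA_A.toList.zip (PySem.Str.slice DNA_A (some 1) none).toList).foldl
      (fun d p =>
        let g := String.ofList [p.1, p.2]
        d.insert g (d.getD g 0 + 1))
      PySem.Dict.empty
  -- str(sum(c for g, c in freq.items() if g in DNA_B))
  PySem.Int.toStr
    ((freq.items.map (fun gc => if PySem.Str.isIn gc.1 DNA_B then gc.2 else 0)).sum)

-- ===== PRECONDITION & SPEC =====
def Spec_get_coincidence (DNA_A : String) (DNA_B : String) (out : String) : Prop := out = get_coincidence_alt DNA_A DNA_B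
instance (DNA_A : String) (DNA_B : String) (out : String) : Decidable (Spec_get_coincidence DNA_A DNA_B out) := by unfold Spec_get_coincidence; infer_instance

-- ===== CLAIM (what is proved, stated in full; the proofs are below) =====
def Claim_equal_get_coincidence : Prop := ∀ (DNA_A : String) (DNA_B : String), Dom_get_coincidence DNA_A DNA_B → Spec_get_coincidence DNA_A DNA_B (get_coincidence DNA_A DNA_B)

-- ===== LEMMAS AND PROOFS =====

-- the list of 2-grams B's first loop runs over
def pvBigrams (s : String) : List String :=
  (s.toList.zip s.toList.tail).map (fun p => String.ofList [p.1, p.2])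

-- membership in the set built by A's first loop
theorem mem_foldl_set_add {α β : Type} [BEq α] [LawfulBEq α]
    (f : β → α) (l : List β) (s0 : PySem.Set α) (y : α) :
    y ∈ l.foldl (fun s p => s.add (f p)) s0 ↔ y ∈ s0 ∨ ∃ p ∈ l, y = f p := by
  induction l generalizing s0 with
  | nil => simp
  | cons h t ih =>
    simp only [List.foldl_cons, ih, PySem.Set.mem_add, List.mem_cons]
    constructor
    · rintro (⟨hs | he⟩ | ⟨p, hp, rfl⟩)
      · exact Or.inl hs
      · exact Or.inr ⟨h, Or.inl rfl, he⟩
      · exact Or.inr ⟨p, Or.inr hp, rfl⟩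
    · rintro (hs | ⟨p, (rfl | hp), rfl⟩)
      · exact Or.inl (Or.inl hs)
      · exact Or.inl (Or.inr rfl)
      · exact Or.inr ⟨p, hp, rfl⟩

-- a length-2 list is an infix iff it is one of the length-2 windows
theorem infix_two_iff {α : Type} (sub L : List α) (hlen : sub.length = 2) :
    sub <:+: L ↔ ∃ j : Nat, j + 2 ≤ L.length ∧ (L.drop j).take 2 = sub := by
  constructor
  · rintro ⟨t, u, rfl⟩
    refine ⟨t.length, by simp [hlen], ?_⟩
    rw [List.append_assoc, List.drop_left, ← hlen, List.take_left]
  · rintro ⟨j, hj, rfl⟩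
    refine ⟨L.take j, L.drop (j + 2), ?_⟩
    have h1 : L.drop (j + 2) = (L.drop j).drop 2 := by
      rw [List.drop_drop]
    rw [h1, List.append_assoc, List.take_append_drop]
    rw [List.take_append_drop]

-- windows of Str.slice, as list windows
theorem toList_slice_window (s : String) (j : Nat) :
    (PySem.Str.slice s (some (j : Int)) (some ((j : Int) + 2))).toList
      = (s.toList.drop j).take 2 := by
  have h := PySem.List.slice_natCast_add s.toList j 2
  simp only [Nat.cast_ofNat] at h
  simp [PySem.Str.slice, h]

-- a length-2 window is the pair of adjacent characters
theorem window_pair {α : Type} (l : List α) (k : Nat) (hk : k + 2 ≤ l.length) :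
    (l.drop k).take 2 = [l[k]'(by omega), l[k+1]'(by omega)] := by
  rw [List.drop_eq_getElem_cons (by omega : k < l.length),
      List.drop_eq_getElem_cons (by omega : k + 1 < l.length)]
  rfl

-- the per-position predicates agree on every index A's loop visits
theorem contains_iff_isIn (DNA_A DNA_B : String) (i : Int)
    (hi : i ∈ PySem.List.pyRange 0 (PySem.Str.len DNA_A - 1) 1) :
    ((PySem.List.pyRange 0 (PySem.Str.len DNA_B - 1) 1).foldl
        (fun s position => s.add (PySem.Str.slice DNA_B (some position) (some (position + 2))))
        PySem.Set.empty).contains (PySem.Str.slice DNA_A (some i) (some (i + 2)))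
      = PySem.Str.isIn (PySem.Str.slice DNA_A (some i) (some (i + 2))) DNA_B := by
  rw [PySem.List.mem_pyRange_iff_of_pos (by norm_num)] at hi
  obtain ⟨h0, hlt, -⟩ := hi
  obtain ⟨j, rfl⟩ : ∃ j : Nat, i = (j : Int) := ⟨i.toNat, (Int.toNat_of_nonneg h0).symm⟩
  have hlenA : (j : Int) < (DNA_A.toList.length : Int) - 1 := by
    simpa [PySem.Str.len_eq] using hlt
  have hjA : j + 2 ≤ DNA_A.toList.length := by omega
  set sub := PySem.Str.slice DNA_A (some (j : Int)) (some ((j : Int) + 2)) with hsub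
  have hsubList : sub.toList = (DNA_A.toList.drop j).take 2 := toList_slice_window _ _
  have hsubLen : sub.toList.length = 2 := by
    rw [hsubList, List.length_take, List.length_drop]; omega
  have lhs_iff : ((PySem.List.pyRange 0 (PySem.Str.len DNA_B - 1) 1).foldl
        (fun s position => s.add (PySem.Str.slice DNA_B (some position) (some (position + 2))))
        PySem.Set.empty).contains sub = true
      ↔ ∃ k : Nat, k + 2 ≤ DNA_B.toList.length ∧ (DNA_B.toList.drop k).take 2 = sub.toList := by
    rw [PySem.Set.contains_iff, mem_foldl_set_add]
    simp only [PySem.Set.empty, List.not_mem_nil, false_or]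
    constructor
    · rintro ⟨p, hp, hpe⟩
      rw [PySem.List.mem_pyRange_iff_of_pos (by norm_num)] at hp
      obtain ⟨hp0, hplt, -⟩ := hp
      obtain ⟨k, rfl⟩ : ∃ k : Nat, p = (k : Int) := ⟨p.toNat, (Int.toNat_of_nonneg hp0).symm⟩
      have : (k : Int) < (DNA_B.toList.length : Int) - 1 := by
        simpa [PySem.Str.len_eq] using hplt
      refine ⟨k, by omega, ?_⟩
      rw [← toList_slice_window, ← hpe]
    · rintro ⟨k, hk, hke⟩
      refine ⟨(k : Int), ?_, ?_⟩
      · rw [PySem.List.mem_pyRange_iff_of_pos (by norm_num)]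
        refine ⟨by positivity, ?_, one_dvd _⟩
        rw [PySem.Str.len_eq]; omega
      · rw [← String.toList_inj, toList_slice_window DNA_B k, hke]
  have rhs_iff : PySem.Str.isIn sub DNA_B = true
      ↔ ∃ k : Nat, k + 2 ≤ DNA_B.toList.length ∧ (DNA_B.toList.drop k).take 2 = sub.toList := by
    rw [PySem.Str.isIn_iff_infix, infix_two_iff _ _ hsubLen]
  exact Bool.eq_iff_iff.mpr (lhs_iff.trans rhs_iff.symm)

-- A's window list, indexed by its range loop, IS B's zip-built 2-gram list
theorem windows_eq_bigrams (DNA_A : String) :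
    (PySem.List.pyRange 0 (PySem.Str.len DNA_A - 1) 1).map
        (fun i => PySem.Str.slice DNA_A (some i) (some (i + 2)))
      = pvBigrams DNA_A := by
  rw [PySem.List.pyRange_one, List.map_map, pvBigrams]
  apply List.ext_getElem
  · simp only [List.length_map, List.length_range, List.length_zip, List.length_tail,
      PySem.Str.len_eq]
    omega
  · intro k h1 h2
    have hk : k + 2 ≤ DNA_A.toList.length := by
      simp only [List.length_map, List.length_zip, List.length_tail] at h2
      omega
    simp only [List.getElem_map, List.getElem_range, Function.comp_apply, List.getElem_zip,
      List.getElem_tail]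
    rw [← String.toList_inj]
    have h0 : (0 : Int) + (k : Int) = (k : Int) := by ring
    rw [h0, toList_slice_window DNA_A k, window_pair DNA_A.toList k hk]
    simp

-- a 0-or-f sum over a list is the sum of f over the filtered list
theorem sum_map_ite_eq_filter {α : Type} (p : α → Bool) (f : α → Int) (L : List α) :
    (L.map (fun k => if p k then f k else 0)).sum = ((L.filter p).map f).sum := by
  induction L with
  | nil => simp
  | cons h t ih =>
    by_cases hp : p h <;> simp [hp, ih]

-- the filtered multiplicity sum over the distinct 2-grams is the per-position count
theorem sum_ite_count_ofList (B : String) (gs : List String) :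
    (List.map ((fun gc : String × Int => if PySem.Str.isIn gc.1 B then gc.2 else 0) ∘
        fun k => (k, (gs.count k : Int))) (PySem.Set.ofList gs)).sum
      = (gs.countP (fun g => PySem.Str.isIn g B) : Int) := by
  simp only [Function.comp_def]
  have hperm : List.Perm (PySem.Set.ofList gs) gs.dedup :=
    (List.perm_ext_iff_of_nodup (PySem.Set.nodup_ofList gs) gs.nodup_dedup).mpr
      (fun a => by simp [PySem.Set.mem_ofList, List.mem_dedup])
  rw [(hperm.map _).sum_eq, sum_map_ite_eq_filter (fun k => PySem.Str.isIn k B)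
        (fun k => (gs.count k : Int)),
      ← List.sum_map_count_dedup_filter_eq_countP (fun g => PySem.Str.isIn g B) gs,
      Nat.cast_list_sum, List.map_map]
  rfl

-- ===== VERDICT (by name: the statement is the Claim_ definition above) =====
theorem get_coincidence_spec : Claim_equal_get_coincidence := by
  intro DNA_A DNA_B _
  show get_coincidence DNA_A DNA_B = get_coincidence_alt DNA_A DNA_B
  unfold get_coincidence get_coincidence_alt
  simp only []
  -- B's zip fold is the counter of the 2-gram list
  have hfold :
      (DNA_A.toList.zip (PySem.Str.slice DNA_A (some 1) none).toList).foldl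
        (fun d p => d.insert (String.ofList [p.1, p.2])
                      (d.getD (String.ofList [p.1, p.2]) 0 + 1))
        PySem.Dict.empty
      = PySem.Dict.counter (pvBigrams DNA_A) := by
    have htail : (PySem.Str.slice DNA_A (some 1) none).toList = DNA_A.toList.tail := by
      simp [PySem.Str.slice, PySem.List.slice_from_one]
    rw [htail, pvBigrams, ← PySem.Dict.foldl_insert_getD_add_one_eq_counter, List.foldl_map]
  rw [hfold, PySem.Dict.items_counter, List.map_map,
      sum_ite_count_ofList DNA_B (pvBigrams DNA_A)]
  -- A's loop is the same per-position count
  congr 1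
  rw [PySem.List.foldl_if_add_one, zero_add, ← windows_eq_bigrams DNA_A, List.countP_map]
  congr 1
  refine List.countP_congr (fun i hi => ?_)
  simp only [Function.comp_apply]
  rw [contains_iff_isIn DNA_A DNA_B i hi]
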